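-- pv_equiv track=rewrite | github.com/algorithm005-class01/algorithm005-class01 | Week_08/G20190343020166/LeetCode_151_0166.py | trip_side
-- ===== SOURCE A (Python) =====
-- def trip_side(s_list):
--     if ''.join(s_list).isspace():
--         return []
--     l, r = 0, len(s_list) - 1
--     while l < r and s_list[l].isspace():
--         l += 1
--     while l < r and s_list[r].isspace():
--         r -= 1
--     return s_list[l:r+1]  #:数组为左闭右开
-- ===== SOURCE B (Python) =====
-- def trip_side(s_list):
--     if ''.join(s_list).isspace():
--         return []
--     idx = [i for i, x in enumerate(s_list) if not x.isspace()]
--     if not idx: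
--         return s_list
--     return s_list[idx[0]:idx[-1] + 1]
-- ===== Notes on version B (the rewrite author's own statement) =====
-- stated objective: simpler
-- what changed: Replaces the two inward-moving early-stopping pointer loops with a single enumerate pass collecting all non-whitespace positions and one slice from the first to the last such position.
import Mathlib
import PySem

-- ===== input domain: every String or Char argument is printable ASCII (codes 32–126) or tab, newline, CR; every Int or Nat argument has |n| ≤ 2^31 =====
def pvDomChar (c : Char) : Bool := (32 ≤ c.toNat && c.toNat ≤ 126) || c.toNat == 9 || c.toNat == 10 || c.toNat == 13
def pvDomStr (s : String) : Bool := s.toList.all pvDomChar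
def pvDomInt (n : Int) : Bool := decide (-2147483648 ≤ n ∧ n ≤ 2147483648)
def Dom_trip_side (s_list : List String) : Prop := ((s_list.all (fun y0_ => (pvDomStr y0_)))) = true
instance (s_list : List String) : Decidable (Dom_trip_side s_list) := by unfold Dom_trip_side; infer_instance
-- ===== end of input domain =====

-- B replaces A's two early-stopping boundary pointer loops with one pass that
-- collects all non-whitespace positions and slices from the first to the last (objective: simpler).

-- ===== PORT A =====
-- while l < r and s_list[l].isspace(): l += 1   (pyGet? none branch is an unreachable totalization guard)
def tripL (s : List String) (r l : Int) : Int :=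
  if l < r then
    match PySem.List.pyGet? s l with
    | some x => if PySem.Str.strIsspace x then tripL s r (l + 1) else l
    | none => l
  else l
termination_by (r - l).toNat
decreasing_by omega

-- while l < r and s_list[r].isspace(): r -= 1
def tripR (s : List String) (l r : Int) : Int :=
  if l < r then
    match PySem.List.pyGet? s r with
    | some x => if PySem.Str.strIsspace x then tripR s l (r - 1) else r
    | none => r
  else r
termination_by (r - l).toNat
decreasing_by omega

def trip_side (s_list : List String) : List String :=
  if PySem.Str.strIsspace (PySem.Str.join "" s_list) then []
  else
    let l := tripL s_list ((s_list.length : Int) - 1) 0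
    let r := tripR s_list l ((s_list.length : Int) - 1)
    PySem.List.slice s_list (some l) (some (r + 1))

-- ===== PORT B =====
-- idx = [i for i, x in enumerate(s_list) if not x.isspace()]
def pvIdx (s : List String) : List Int :=
  (PySem.List.enumerate s 0).filterMap
    (fun p => if PySem.Str.strIsspace p.2 then none else some p.1)

def trip_side_alt (s_list : List String) : List String :=
  if PySem.Str.strIsspace (PySem.Str.join "" s_list) then []
  else
    match pvIdx s_list with
    | [] => s_list
    | i :: rest =>
        PySem.List.slice s_list (some i)
          (some ((i :: rest).getLast (List.cons_ne_nil _ _) + 1))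

-- ===== PRECONDITION & SPEC =====
def Spec_trip_side (s_list : List String) (out : List String) : Prop := out = trip_side_alt s_list
instance (s_list : List String) (out : List String) : Decidable (Spec_trip_side s_list out) := by unfold Spec_trip_side; infer_instance

-- ===== CLAIM (what is proved, stated in full; the proofs are below) =====
def Claim_equal_trip_side : Prop := ∀ (s_list : List String), Dom_trip_side s_list → Spec_trip_side s_list (trip_side s_list)

-- ===== LEMMAS AND PROOFS =====

theorem mem_pvIdx (s : List String) (z : Int) :
    z ∈ pvIdx s ↔ ∃ (k : Nat) (h : k < s.length), z = (k : Int) ∧ PySem.Str.strIsspace s[k] = false := by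
  unfold pvIdx
  rw [List.mem_filterMap]
  constructor
  · rintro ⟨p, hp, hf⟩
    rw [PySem.List.mem_enumerate_iff] at hp
    obtain ⟨k, hk, rfl⟩ := hp
    by_cases hs : PySem.Str.strIsspace s[k] = true
    · rw [if_pos hs] at hf; exact absurd hf (by simp)
    · rw [if_neg hs] at hf
      refine ⟨k, hk, ?_, by simpa using hs⟩
      have := Option.some.inj hf
      omega
  · rintro ⟨k, hk, rfl, hs⟩
    refine ⟨((0 : Int) + (k : Int), s[k]),
      (PySem.List.mem_enumerate_iff s 0 _).2 ⟨k, hk, rfl⟩, ?_⟩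
    rw [if_neg (by simp only [hs, Bool.false_eq_true, not_false_eq_true])]
    simp

theorem pairwise_pvIdx (s : List String) : (pvIdx s).Pairwise (· < ·) := by
  unfold pvIdx
  rw [List.pairwise_filterMap]
  refine (PySem.List.pairwise_lt_enumerate s 0).imp_of_mem ?_
  intro p q _ _ hpq b hb b' hb'
  split at hb
  · exact absurd hb (by simp)
  · split at hb'
    · exact absurd hb' (by simp)
    · rw [← Option.some.inj hb, ← Option.some.inj hb']; exact hpq

theorem le_getLast_of_pairwise (l : List Int) (hl : l.Pairwise (· < ·)) (z : Int) (hz : z ∈ l)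
    (h : l ≠ []) : z ≤ l.getLast h := by
  induction l with
  | nil => simp at hz
  | cons a t ih =>
    rcases t with _ | ⟨b, t'⟩
    · simp at hz; simp [hz, List.getLast]
    · rw [List.getLast_cons (by simp)]
      rcases List.mem_cons.1 hz with rfl | hz'
      · have := (List.pairwise_cons.1 hl).1
        have hb := this _ (List.getLast_mem (l := b :: t') (by simp))
        exact le_of_lt hb
      · exact ih (List.pairwise_cons.1 hl).2 hz' (by simp)

-- first-pointer loop reaches the first non-whitespace index
theorem tripL_eq (s : List String) (i : Nat) (hi : i < s.length)
    (hpre : ∀ (k : Nat) (hki : k < i), PySem.Str.strIsspace (s[k]'(by omega)) = true)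
    (hs : PySem.Str.strIsspace (s[i]'hi) = false) :
    ∀ (d l : Nat), i = l + d → tripL s ((s.length : Int) - 1) (l : Int) = (i : Int) := by
  intro d
  induction d with
  | zero =>
    intro l hl
    have hl' : l = i := by omega
    subst hl'
    rw [tripL]
    by_cases hc : (l : Int) < (s.length : Int) - 1
    · rw [if_pos hc, PySem.List.pyGet?_natCast, List.getElem?_eq_getElem hi]
      simp only [hs, Bool.false_eq_true, if_false]
    · rw [if_neg hc]
  | succ d ih =>
    intro l hl
    have hln : (l : Int) < (s.length : Int) - 1 := by omega
    rw [tripL, if_pos hln, PySem.List.pyGet?_natCast,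
      List.getElem?_eq_getElem (by omega : l < s.length)]
    have : PySem.Str.strIsspace (s[l]'(by omega)) = true := hpre l (by omega)
    simp only [this, if_true]
    have := ih (l + 1) (by omega)
    simpa [Int.add_comm, Nat.cast_add] using this

-- second-pointer loop reaches the last non-whitespace index
theorem tripR_eq (s : List String) (i j : Nat) (hj : j < s.length) (hij : i ≤ j)
    (hpost : ∀ (k : Nat) (h : k < s.length), j < k → PySem.Str.strIsspace (s[k]'h) = true)
    (hs : PySem.Str.strIsspace (s[j]'hj) = false) :
    ∀ (d r : Nat), r < s.length → r = j + d → tripR s (i : Int) (r : Int) = (j : Int) := by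
  intro d
  induction d with
  | zero =>
    intro r hr hrj
    have : r = j := by omega
    subst this
    rw [tripR]
    by_cases hc : (i : Int) < (r : Int)
    · rw [if_pos hc, PySem.List.pyGet?_natCast, List.getElem?_eq_getElem hj]
      simp only [hs, Bool.false_eq_true, if_false]
    · rw [if_neg hc]
  | succ d ih =>
    intro r hr hrj
    have hc : (i : Int) < (r : Int) := by omega
    rw [tripR, if_pos hc, PySem.List.pyGet?_natCast,
      List.getElem?_eq_getElem hr]
    have : PySem.Str.strIsspace (s[r]'hr) = true := hpost r hr (by omega)
    simp only [this, if_true]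
    have := ih (r - 1) (by omega) (by omega)
    have hcast : ((r : Int) - 1) = ((r - 1 : Nat) : Int) := by omega
    rw [hcast]; exact this

-- every element space (as strings) and list nonempty forces the joined guard to fire
theorem guard_of_all_space (s : List String) (hne : s ≠ [])
    (hall : ∀ x ∈ s, PySem.Str.strIsspace x = true) :
    PySem.Str.strIsspace (PySem.Str.join "" s) = true := by
  rw [PySem.Str.strIsspace_eq, PySem.Str.toList_join]
  have hjoin : PySem.Chars.join "".toList (s.map String.toList) = (s.map String.toList).flatten := by
    simp [PySem.Chars.join, List.intercalate]
    induction s with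
    | nil => simp
    | cons a t ih => cases t <;> simp_all
  rw [hjoin]
  unfold PySem.Chars.strIsspace
  have hflat : ∀ x ∈ s, x.toList ≠ [] ∧ x.toList.all PySem.Chars.isspace = true := by
    intro x hx
    have := hall x hx
    rw [PySem.Str.strIsspace_eq] at this
    unfold PySem.Chars.strIsspace at this
    simp only [Bool.and_eq_true, Bool.not_eq_true', List.isEmpty_eq_false_iff] at this
    exact this
  rcases s with _ | ⟨a, t⟩
  · exact absurd rfl hne
  · have ha := hflat a (by simp)
    simp only [Bool.and_eq_true, Bool.not_eq_true', List.isEmpty_eq_false_iff]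
    constructor
    · simp only [List.map_cons, List.flatten_cons]
      intro h
      exact ha.1 (by rcases List.append_eq_nil_iff.1 h with ⟨h1, _⟩; exact h1)
    · rw [List.all_eq_true]
      intro c hc
      rw [List.mem_flatten] at hc
      obtain ⟨ys, hys, hcys⟩ := hc
      rw [List.mem_map] at hys
      obtain ⟨x, hx, rfl⟩ := hys
      have := (hflat x hx).2
      rw [List.all_eq_true] at this
      exact this c hcys

theorem trip_side_eq_alt (s : List String) : trip_side s = trip_side_alt s := by
  unfold trip_side trip_side_alt
  by_cases hg : PySem.Str.strIsspace (PySem.Str.join "" s) = true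
  · rw [if_pos hg, if_pos hg]
  · rw [if_neg hg, if_neg hg]
    rcases hidx : pvIdx s with _ | ⟨i, rest⟩
    · -- no non-whitespace element at all: forces s = []
      have hall : ∀ x ∈ s, PySem.Str.strIsspace x = true := by
        intro x hx
        obtain ⟨k, hk, rfl⟩ := List.mem_iff_getElem.1 hx
        by_contra hnt
        have : (k : Int) ∈ pvIdx s :=
          (mem_pvIdx s k).2 ⟨k, hk, rfl, by simpa using hnt⟩
        rw [hidx] at this; simp at this
      have hsnil : s = [] := by
        by_contra hne
        exact hg (guard_of_all_space s hne hall)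
      subst hsnil
      simp [tripL, tripR, PySem.List.slice]
    · -- i = first non-whitespace index, getLast = last one
      have hmem_i : i ∈ pvIdx s := by rw [hidx]; simp
      obtain ⟨k, hk, rfl, hks⟩ := (mem_pvIdx s i).1 hmem_i
      have hpw : (pvIdx s).Pairwise (· < ·) := pairwise_pvIdx s
      have hfirst : ∀ (m : Nat) (hm : m < k), PySem.Str.strIsspace (s[m]'(by omega)) = true := by
        intro m hm
        by_contra hnt
        have hmmem : (m : Int) ∈ pvIdx s :=
          (mem_pvIdx s m).2 ⟨m, by omega, rfl, by simpa using hnt⟩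
        rw [hidx] at hmmem
        rcases List.mem_cons.1 hmmem with h | h
        · have : m = k := by exact_mod_cast h
          omega
        · rw [hidx] at hpw
          have := (List.pairwise_cons.1 hpw).1 _ h
          omega
      -- last element
      have hne : pvIdx s ≠ [] := by rw [hidx]; simp
      set j : Int := ((k : Int) :: rest).getLast (List.cons_ne_nil _ _) with hjdef
      have hjlast : j = (pvIdx s).getLast hne := by
        rw [hjdef]
        congr 1
        simp [hidx]
      have hjmem : j ∈ pvIdx s := by rw [hjlast]; exact List.getLast_mem hne
      obtain ⟨k', hk', hjk', hk's⟩ := (mem_pvIdx s j).1 hjmem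
      have hkk' : k ≤ k' := by
        have : (k : Int) ≤ j := by
          rw [hjlast]; exact le_getLast_of_pairwise _ hpw _ hmem_i hne
        omega
      have hlastp : ∀ (m : Nat) (h : m < s.length), k' < m → PySem.Str.strIsspace (s[m]'h) = true := by
        intro m hm hk'm
        by_contra hnt
        have hmmem : (m : Int) ∈ pvIdx s :=
          (mem_pvIdx s m).2 ⟨m, hm, rfl, by simpa using hnt⟩
        have := le_getLast_of_pairwise _ hpw _ hmmem hne
        rw [← hjlast, hjk'] at this
        omega
      have hL : tripL s ((s.length : Int) - 1) 0 = (k : Int) := by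
        have := tripL_eq s k hk hfirst hks k 0 (by omega)
        simpa using this
      have hR : tripR s ((k : Int)) ((s.length : Int) - 1) = (k' : Int) := by
        have hlen1 : s.length - 1 < s.length := by omega
        have := tripR_eq s k k' hk' hkk' hlastp hk's (s.length - 1 - k') (s.length - 1)
          hlen1 (by omega)
        have hcast : ((s.length : Int) - 1) = ((s.length - 1 : Nat) : Int) := by omega
        rw [hcast]; exact this
      show PySem.List.slice s (some (tripL s ((s.length : Int) - 1) 0))
            (some (tripR s (tripL s ((s.length : Int) - 1) 0) ((s.length : Int) - 1) + 1)) =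
          PySem.List.slice s (some ((k : Int)))
            (some (((k : Int) :: rest).getLast (List.cons_ne_nil _ _) + 1))
      rw [hL, hR, ← hjdef, hjk']

-- ===== VERDICT (by name: the statement is the Claim_ definition above) =====
theorem trip_side_spec : Claim_equal_trip_side := by
  intro s _
  unfold Spec_trip_side
  exact trip_side_eq_alt s
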